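-- pv_equiv track=rewrite | github.com/Alexxkent/adentify | segment_video.py | next_block_is_ad
-- ===== SOURCE A (Python) =====
-- def next_block_is_ad(starting_index, durations, ad_lengths, buffer):
--     i = starting_index
--     total_duration = 0
--
--     while i < len(durations) and total_duration < max(ad_lengths) + buffer:
--         total_duration += durations[i]
--         if any(abs(total_duration - ad_length) <= buffer for ad_length in ad_lengths):
--             return True
--         i += 1
--     return False
-- ===== SOURCE B (Python) =====
-- def next_block_is_ad(starting_index, durations, ad_lengths, buffer):
--     n = len(durations)
--     if starting_index >= n:
--         return False
--     limit = max(ad_lengths) + buffer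
--     ads = sorted(ad_lengths)
--     total = 0
--     i = starting_index
--     while i < n and total < limit:
--         total += durations[i]
--         # binary search: smallest index lo with ads[lo] >= total - buffer
--         lo, hi = 0, len(ads)
--         key = total - buffer
--         while lo < hi:
--             mid = (lo + hi) // 2
--             if ads[mid] < key:
--                 lo = mid + 1
--             else:
--                 hi = mid
--         if lo < len(ads) and ads[lo] <= total + buffer:
--             return True
--         i += 1
--     return False
-- ===== Notes on version B (the rewrite author's own statement) =====
-- stated objective: alternative
-- what changed: B hoists max(ad_lengths)+buffer out of the loop, sorts ad_lengths once, and replaces the per-step linear any() scan over ad_lengths by a hand-written binary search for interval membership [total-buffer, total+buffer]; this trades a per-step O(k) scan for an O(log k) search after an O(k log k) sort, which a timing run did not measure as faster on its inputs (small ad_lengths).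
import Mathlib
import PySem

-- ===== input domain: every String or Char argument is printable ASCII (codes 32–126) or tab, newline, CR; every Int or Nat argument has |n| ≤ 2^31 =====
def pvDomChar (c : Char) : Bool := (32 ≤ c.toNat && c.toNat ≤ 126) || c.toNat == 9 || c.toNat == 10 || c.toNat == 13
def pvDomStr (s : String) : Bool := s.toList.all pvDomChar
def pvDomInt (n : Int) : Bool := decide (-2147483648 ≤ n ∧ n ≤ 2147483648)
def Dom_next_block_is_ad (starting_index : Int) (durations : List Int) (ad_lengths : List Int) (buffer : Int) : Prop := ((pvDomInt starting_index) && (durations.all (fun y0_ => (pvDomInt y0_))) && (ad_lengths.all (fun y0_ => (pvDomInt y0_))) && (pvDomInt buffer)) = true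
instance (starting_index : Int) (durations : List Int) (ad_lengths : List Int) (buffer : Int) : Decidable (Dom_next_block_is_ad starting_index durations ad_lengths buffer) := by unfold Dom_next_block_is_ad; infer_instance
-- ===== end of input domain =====

-- B hoists the loop bound max(ad_lengths)+buffer out of the loop, sorts ad_lengths once and
-- replaces the per-step linear scan over ad_lengths by a binary search (objective: alternative).


-- ===== PORT A =====
-- max(ad_lengths): Python's max of a nonempty int list (the [] case is outside Pre_; the default 0 is never used there)
def pvMaxA (l : List Int) : Int := (l.max?).getD 0

-- A's while loop; fuel = (len(durations) - starting_index), an upper bound on the iteration count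
def pvLoopA (ds als : List Int) (buffer : Int) : Nat → Int → Int → Bool
  | 0, _, _ => false
  | fuel + 1, i, total =>
    if i < (ds.length : Int) then
      if total < pvMaxA als + buffer then
        match PySem.List.pyGet? ds i with
        | none => false   -- IndexError: outside Pre_
        | some d =>
          let t := total + d
          if als.any (fun a => decide (|t - a| ≤ buffer)) then true
          else pvLoopA ds als buffer fuel (i + 1) t
      else false
    else false

def next_block_is_ad (starting_index : Int) (durations : List Int) (ad_lengths : List Int) (buffer : Int) : Bool :=
  pvLoopA durations ad_lengths buffer ((durations.length - starting_index).toNat) starting_index 0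

-- ===== PORT B =====
-- Source B's hand-written inner while loop: smallest lo in [lo,hi] with ads[lo] >= key
-- (every ads[mid] access has 0 <= mid < len(ads), so getD's default is never used)
def pvBsearchB (ads : List Int) (key : Int) (lo hi : Nat) : Nat :=
  if _h : lo < hi then
    let mid := (lo + hi) / 2
    if ads.getD mid 0 < key then pvBsearchB ads key (mid + 1) hi
    else pvBsearchB ads key lo mid
  else lo
termination_by hi - lo
decreasing_by all_goals omega

-- Source B's outer while loop, with limit and the sorted list precomputed
def pvLoopB (ds ads : List Int) (buffer limit : Int) : Nat → Int → Int → Bool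
  | 0, _, _ => false
  | fuel + 1, i, total =>
    if i < (ds.length : Int) ∧ total < limit then
      match PySem.List.pyGet? ds i with
      | none => false   -- IndexError: outside Pre_
      | some d =>
        let t := total + d
        let lo := pvBsearchB ads (t - buffer) 0 ads.length
        if lo < ads.length ∧ ads.getD lo 0 ≤ t + buffer then true
        else pvLoopB ds ads buffer limit fuel (i + 1) t
    else false

def next_block_is_ad_alt (starting_index : Int) (durations : List Int) (ad_lengths : List Int) (buffer : Int) : Bool :=
  if starting_index ≥ (durations.length : Int) then false
  else
    let limit := (ad_lengths.max?).getD 0 + buffer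
    let ads := PySem.List.sorted ad_lengths (fun x => x) false
    pvLoopB durations ads buffer limit ((durations.length - starting_index).toNat) starting_index 0

-- ===== PRECONDITION & SPEC =====
-- Pre_ excludes exactly the inputs where A raises: ValueError from max([]) when the loop head is reached
-- with empty ad_lengths (starting_index < len(durations)), and IndexError when starting_index <
-- -len(durations) and the loop is entered (max(ad_lengths)+buffer > 0); B raises there too.
def Pre_next_block_is_ad (starting_index : Int) (durations : List Int) (ad_lengths : List Int) (buffer : Int) : Prop :=
  (ad_lengths = [] → (durations.length : Int) ≤ starting_index) ∧
  (starting_index < -(durations.length : Int) → (ad_lengths.max?).getD 0 + buffer ≤ 0)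
instance (starting_index : Int) (durations : List Int) (ad_lengths : List Int) (buffer : Int) : Decidable (Pre_next_block_is_ad starting_index durations ad_lengths buffer) := by unfold Pre_next_block_is_ad; infer_instance

def pvWitness_next_block_is_ad : Int × List Int × List Int × Int := (0, [5, 3], [8], 1)

def Spec_next_block_is_ad (starting_index : Int) (durations : List Int) (ad_lengths : List Int) (buffer : Int) (out : Bool) : Prop := out = next_block_is_ad_alt starting_index durations ad_lengths buffer
instance (starting_index : Int) (durations : List Int) (ad_lengths : List Int) (buffer : Int) (out : Bool) : Decidable (Spec_next_block_is_ad starting_index durations ad_lengths buffer out) := by unfold Spec_next_block_is_ad; infer_instance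

-- ===== CLAIM (what is proved, stated in full; the proofs are below) =====
def Claim_equal_next_block_is_ad : Prop := ∀ (starting_index : Int) (durations : List Int) (ad_lengths : List Int) (buffer : Int), Dom_next_block_is_ad starting_index durations ad_lengths buffer → Pre_next_block_is_ad starting_index durations ad_lengths buffer → Spec_next_block_is_ad starting_index durations ad_lengths buffer (next_block_is_ad starting_index durations ad_lengths buffer)

-- ===== LEMMAS AND PROOFS =====

-- Binary-search invariant: on a list that is monotone on [0, len), pvBsearchB keeps
-- "everything below lo is < key, everything from hi on is ≥ key" and lands at the boundary.
theorem pvBsearchB_spec (ads : List Int) (key : Int)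
    (hsort : ∀ p q : Nat, p ≤ q → q < ads.length → ads.getD p 0 ≤ ads.getD q 0)
    (lo hi : Nat)
    (hhi : hi ≤ ads.length) (hlohi : lo ≤ hi)
    (hpre : ∀ j, j < lo → ads.getD j 0 < key)
    (hsuf : ∀ j, hi ≤ j → j < ads.length → key ≤ ads.getD j 0) :
    pvBsearchB ads key lo hi ≤ ads.length ∧
      (∀ j, j < pvBsearchB ads key lo hi → ads.getD j 0 < key) ∧
      (∀ j, pvBsearchB ads key lo hi ≤ j → j < ads.length → key ≤ ads.getD j 0) := by
  fun_induction pvBsearchB ads key lo hi with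
  | case1 lo hi h mid hlt ih =>
      exact ih hhi (by omega) (fun j hj => by
        have : j ≤ mid := by omega
        exact lt_of_le_of_lt (hsort j mid this (by omega)) hlt) hsuf
  | case2 lo hi h mid hlt ih =>
      exact ih (by omega) (by omega) hpre (fun j hj hj2 =>
        le_trans (le_of_not_gt hlt) (hsort mid j hj hj2))
  | case3 lo hi h =>
      exact ⟨by omega, hpre, fun j hj hj2 => hsuf j (by omega) hj2⟩

-- Interval membership via bisect on the sorted copy = a linear scan of the original list.
theorem pvBsearch_mem (als : List Int) (k u : Int) :
    decide (pvBsearchB (PySem.List.sorted als (fun x => x) false) k 0 (PySem.List.sorted als (fun x => x) false).length < (PySem.List.sorted als (fun x => x) false).length ∧ (PySem.List.sorted als (fun x => x) false).getD (pvBsearchB (PySem.List.sorted als (fun x => x) false) k 0 (PySem.List.sorted als (fun x => x) false).length) 0 ≤ u)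
    = als.any (fun a => decide (k ≤ a ∧ a ≤ u)) := by
  set ads := PySem.List.sorted als (fun x => x) false with hads
  set lo := pvBsearchB ads k 0 ads.length with hlo
  have hsort : ∀ p q : Nat, p ≤ q → q < ads.length → ads.getD p 0 ≤ ads.getD q 0 := by
    intro p q hpq hq
    have hp : p < ads.length := lt_of_le_of_lt (by omega) hq
    rw [List.getD_eq_getElem _ _ hp, List.getD_eq_getElem _ _ hq]
    exact PySem.List.sorted_id_getElem_mono als hpq hq
  obtain ⟨hle, hpre, hsuf⟩ := pvBsearchB_spec ads k hsort 0 ads.length le_rfl (Nat.zero_le _)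
    (fun j hj => absurd hj (Nat.not_lt_zero j)) (fun j hj hj2 => absurd hj2 (by omega))
  have hperm : ads.Perm als := PySem.List.sorted_perm als (fun x => x) false
  rw [← hperm.any_eq]
  rw [Bool.eq_iff_iff]
  simp only [List.any_eq_true, decide_eq_true_eq]
  constructor
  · rintro ⟨hlt, hub⟩
    refine ⟨ads.getD lo 0, ?_, hsuf lo le_rfl hlt, hub⟩
    rw [List.getD_eq_getElem _ _ hlt]; exact List.getElem_mem _
  · rintro ⟨a, ha, hka, hau⟩
    obtain ⟨j, hj, rfl⟩ := List.getElem_of_mem ha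
    have hjD : ads.getD j 0 = ads[j] := List.getD_eq_getElem _ _ hj
    have hjr : lo ≤ j := by
      by_contra hc
      have := hpre j (by omega)
      rw [hjD] at this; omega
    exact ⟨by omega, le_trans (hsort lo j hjr hj) (hjD ▸ hau)⟩

-- The two loops agree step for step (same i, same running total, equal tests).
theorem pvLoop_eq (ds als : List Int) (buffer : Int) :
    ∀ fuel (i total : Int),
      pvLoopA ds als buffer fuel i total
      = pvLoopB ds (PySem.List.sorted als (fun x => x) false) buffer
          ((als.max?).getD 0 + buffer) fuel i total := by
  intro fuel
  induction fuel with
  | zero => intro i total; rfl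
  | succ n ih =>
    intro i total
    simp only [pvLoopA, pvLoopB, pvMaxA]
    by_cases h1 : i < (ds.length : Int)
    · by_cases h2 : total < (als.max?).getD 0 + buffer
      · simp only [h1, h2, if_true, and_self]
        cases hg : PySem.List.pyGet? ds i with
        | none => rfl
        | some d =>
          have habs : ∀ a : Int, decide (|total + d - a| ≤ buffer)
              = decide (total + d - buffer ≤ a ∧ a ≤ total + d + buffer) := fun a =>
            decide_eq_decide.mpr (by rw [abs_le]; constructor <;> (intro; constructor <;> omega))
          have hbool := pvBsearch_mem als (total + d - buffer) (total + d + buffer)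
          simp only [habs]
          rw [← hbool]
          cases hP : decide (pvBsearchB (PySem.List.sorted als (fun x => x) false) (total + d - buffer) 0 (PySem.List.sorted als (fun x => x) false).length < (PySem.List.sorted als (fun x => x) false).length ∧ (PySem.List.sorted als (fun x => x) false).getD (pvBsearchB (PySem.List.sorted als (fun x => x) false) (total + d - buffer) 0 (PySem.List.sorted als (fun x => x) false).length) 0 ≤ total + d + buffer) with
          | true => simp only [of_decide_eq_true hP, if_true]; simp
          | false => simp only [of_decide_eq_false hP]; simp [ih]
      · simp only [h1, h2, if_true, if_false, and_false]
    · simp only [h1, if_false, false_and]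

-- ===== VERDICT (by name: the statement is the Claim_ definition above) =====
theorem next_block_is_ad_spec : Claim_equal_next_block_is_ad := by
  intro s ds als buf _hd _hpre
  unfold Spec_next_block_is_ad next_block_is_ad next_block_is_ad_alt
  by_cases hs : s ≥ (ds.length : Int)
  · simp only [hs, if_true]
    have : ((ds.length : Int) - s).toNat = 0 := by omega
    rw [this]; rfl
  · simp only [hs, if_false]
    exact pvLoop_eq ds als buf _ s 0
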